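-- pv_equiv track=rewrite | github.com/liuyaox/feishu | archived/Feishu.py | xy_to_cell
-- ===== SOURCE A (Python) =====
-- ALPHABET = 'ABCDEFGHIJKLMNOPQRSTUVWXYZ'
--
-- def xy_to_cell(row_index, col_index):
--     """
--     坐标(x, y)转化为Cell编号，比如：(5, 1) -> 'B6'
--     :param row_index: 数组的行，从0开始
--     :param col_index: 数组的列，从0开始
--     :return:
--     """
--     temp = col_index + 1
--     res = []
--     while temp > 0:
--         temp -= 1
--         res.append(ALPHABET[temp % 26])
--         temp //= 26
--     res.reverse()
--     col = ''.join(res)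
--     return f'{col}{row_index + 1}'
-- ===== SOURCE B (Python) =====
-- ALPHABET = 'ABCDEFGHIJKLMNOPQRSTUVWXYZ'
--
-- def xy_to_cell(row_index, col_index):
--     n = col_index + 1
--     col = ''
--     if n > 0:
--         # find the column-label length and the cumulative count of labels up to it
--         length, total = 1, 26
--         while n > total:
--             length += 1
--             total += 26 ** length
--         # zero-based rank of the label among the length-digit labels
--         m = n - (total - 26 ** length) - 1
--         # emit m's ordinary base-26 digits most-significant-first
--         for p in reversed(range(length)):
--             col += ALPHABET[m // 26 ** p % 26]
--     return f'{col}{row_index + 1}'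
-- ===== Notes on version B (the rewrite author's own statement) =====
-- stated objective: alternative
-- what changed: Replaces A's back-to-front divmod digit loop (append to a list, then reverse and join) with a rank-based conversion: first find the label length and cumulative label count by a power loop, then emit the ordinary base-26 digits of the label's rank most-significant-first.
import Mathlib
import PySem

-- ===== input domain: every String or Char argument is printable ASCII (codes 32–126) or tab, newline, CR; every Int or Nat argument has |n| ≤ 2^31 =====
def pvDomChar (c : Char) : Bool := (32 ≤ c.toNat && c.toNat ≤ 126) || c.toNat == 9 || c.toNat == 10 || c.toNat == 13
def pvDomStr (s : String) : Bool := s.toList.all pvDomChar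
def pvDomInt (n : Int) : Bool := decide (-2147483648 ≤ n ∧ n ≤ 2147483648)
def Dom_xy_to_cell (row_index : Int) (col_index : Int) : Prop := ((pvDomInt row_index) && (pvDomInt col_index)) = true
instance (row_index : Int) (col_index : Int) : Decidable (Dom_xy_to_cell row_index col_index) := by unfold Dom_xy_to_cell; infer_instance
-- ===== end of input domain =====

-- B replaces A's back-to-front divmod digit loop (append then reverse) with a rank-based
-- conversion: it first finds the label length, then emits the ordinary base-26 digits of the
-- label's rank most-significant-first; objective: alternative algorithm (same cost).

-- ===== PORT A =====
def pvAlphabet : List Char := "ABCDEFGHIJKLMNOPQRSTUVWXYZ".toList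

-- the while-loop of A: temp -= 1; res.append(ALPHABET[temp % 26]); temp //= 26
-- ALPHABET[temp % 26] is always in range (0 ≤ mod < 26), so the total pyGetD is exact here.
def pvLoopA (temp : Int) (res : List Char) : List Char :=
  if _h : temp > 0 then
    pvLoopA (PySem.Int.floordiv (temp - 1) 26)
            (res ++ [PySem.List.pyGetD pvAlphabet (PySem.Int.mod (temp - 1) 26) ' '])
  else res
termination_by temp.toNat
decreasing_by
  have h2 : PySem.Int.floordiv (temp - 1) 26 ≤ temp - 1 := by
    rw [PySem.Int.floordiv_eq_ediv_of_pos (by omega)]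
    exact Int.ediv_le_self _ (by omega)
  omega

def xy_to_cell (row_index : Int) (col_index : Int) : String :=
  String.ofList ((pvLoopA (col_index + 1) []).reverse ++ PySem.Int.toChars (row_index + 1))

-- ===== PORT B =====
-- the while-loop of B: length += 1; total += 26 ** length
def pvLenLoop (n : Int) (length : Int) (total : Int) : Int × Int :=
  if _h : n > total then pvLenLoop n (length + 1) (total + 26 ^ (length + 1).toNat)
  else (length, total)
termination_by (n - total).toNat
decreasing_by
  have h1 : (0:Int) < 26 ^ (length + 1).toNat := pow_pos (by norm_num) _
  omega

-- ALPHABET[m // 26 ** p % 26] is always in range, so the total pyGetD is exact here.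
def xy_to_cell_alt (row_index : Int) (col_index : Int) : String :=
  let n := col_index + 1
  let col : List Char :=
    if n > 0 then
      let lt := pvLenLoop n 1 26
      let m := n - (lt.2 - 26 ^ lt.1.toNat) - 1
      ((PySem.List.pyRange 0 lt.1 1).reverse).foldl
        (fun acc p =>
          acc ++ [PySem.List.pyGetD pvAlphabet
                    (PySem.Int.mod (PySem.Int.floordiv m (26 ^ p.toNat)) 26) ' ']) []
    else []
  String.ofList (col ++ PySem.Int.toChars (row_index + 1))

-- ===== PRECONDITION & SPEC =====
def Spec_xy_to_cell (row_index : Int) (col_index : Int) (out : String) : Prop := out = xy_to_cell_alt row_index col_index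
instance (row_index : Int) (col_index : Int) (out : String) : Decidable (Spec_xy_to_cell row_index col_index out) := by unfold Spec_xy_to_cell; infer_instance

-- ===== CLAIM (what is proved, stated in full; the proofs are below) =====
def Claim_equal_xy_to_cell : Prop := ∀ (row_index : Int) (col_index : Int), Dom_xy_to_cell row_index col_index → Spec_xy_to_cell row_index col_index (xy_to_cell row_index col_index)

-- ===== LEMMAS AND PROOFS =====

-- canonical MSB-first bijective base-26 digits, shared reference point of the two ports
def pvColName (n : Int) : List Char :=
  if _h : n ≤ 0 then []
  else
    pvColName (PySem.Int.floordiv (n - 1) 26)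
      ++ [PySem.List.pyGetD pvAlphabet (PySem.Int.mod (n - 1) 26) ' ']
termination_by n.toNat
decreasing_by
  have h2 : PySem.Int.floordiv (n - 1) 26 ≤ n - 1 := by
    rw [PySem.Int.floordiv_eq_ediv_of_pos (by omega)]
    exact Int.ediv_le_self _ (by omega)
  omega

-- A's loop result equals the accumulator followed by the canonical digits reversed.
theorem pvLoopA_eq (temp : Int) (res : List Char) :
    pvLoopA temp res = res ++ (pvColName temp).reverse := by
  induction temp, res using pvLoopA.induct with
  | case1 temp res h ih =>
      rw [pvLoopA, pvColName, dif_pos h, dif_neg (by omega : ¬ temp ≤ 0), ih]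
      simp
  | case2 temp res h =>
      rw [pvLoopA, pvColName, dif_neg h, dif_pos (by omega : temp ≤ 0)]
      simp

-- cumulative count of column labels of length ≤ L : pvC L = 26 + 26² + … + 26^L
def pvC : Nat → Int
  | 0 => 0
  | L + 1 => 26 * pvC L + 26

theorem pvC_nonneg (L : Nat) : 0 ≤ pvC L := by
  induction L with
  | zero => simp [pvC]
  | succ K ih => simp only [pvC]; omega

theorem pvC_succ (L : Nat) : pvC (L + 1) = pvC L + 26 ^ (L + 1) := by
  induction L with
  | zero => simp [pvC]
  | succ K ih =>
      calc pvC (K + 1 + 1) = 26 * pvC (K + 1) + 26 := rfl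
        _ = (26 * pvC K + 26) + 26 ^ (K + 1 + 1) := by rw [ih]; ring
        _ = pvC (K + 1) + 26 ^ (K + 1 + 1) := by
              rw [show pvC (K + 1) = 26 * pvC K + 26 from rfl]

-- the length loop, started anywhere on the cumulative-count ladder, lands on the exact rung
theorem pvLenLoop_spec (n length total : Int) :
    (∃ L : Nat, 1 ≤ L ∧ length = (L : Int) ∧ total = pvC L ∧ pvC (L - 1) < n) →
    ∃ L' : Nat, 1 ≤ L' ∧ pvLenLoop n length total = ((L' : Int), pvC L') ∧
      pvC (L' - 1) < n ∧ n ≤ pvC L' := by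
  induction length, total using pvLenLoop.induct n with
  | case1 length total hgt ih =>
      rintro ⟨L, hL1, hlen, htot, hlt⟩
      rw [pvLenLoop, dif_pos hgt]
      apply ih
      refine ⟨L + 1, by omega, by omega, ?_, ?_⟩
      · have ht : ((length + 1).toNat) = L + 1 := by omega
        rw [ht, htot, pvC_succ]
      · have : L + 1 - 1 = L := by omega
        rw [this, ← htot]; exact hgt
  | case2 length total hgt =>
      rintro ⟨L, hL1, hlen, htot, hlt⟩
      rw [pvLenLoop, dif_neg hgt]
      exact ⟨L, hL1, by rw [hlen, htot], hlt, by omega⟩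

-- MSB-first ordinary base-26 digits of m, positions L-1 … 0
def pvMapDesc (L : Nat) (m : Int) : List Char :=
  (List.range L).reverse.map
    (fun p => PySem.List.pyGetD pvAlphabet
                (PySem.Int.mod (PySem.Int.floordiv m ((26:Int) ^ p)) 26) ' ')

theorem pvDigit_succ (m : Int) (p : Nat) :
    PySem.Int.floordiv m ((26:Int) ^ (p + 1)) = PySem.Int.floordiv (m / 26) ((26:Int) ^ p) := by
  rw [PySem.Int.floordiv_eq_ediv_of_pos (pow_pos (by norm_num) _),
      PySem.Int.floordiv_eq_ediv_of_pos (pow_pos (by norm_num) _)]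
  rw [pow_succ, mul_comm, ← Int.ediv_ediv_of_nonneg (by norm_num : (0:Int) ≤ 26)]

theorem pvMapDesc_succ (L : Nat) (m : Int) :
    pvMapDesc (L + 1) m
      = pvMapDesc L (m / 26)
        ++ [PySem.List.pyGetD pvAlphabet (PySem.Int.mod m 26) ' '] := by
  unfold pvMapDesc
  have h0 : List.range (L + 1) = 0 :: (List.range L).map (· + 1) := by
    rw [List.range_succ_eq_map]
  rw [h0]
  simp only [List.reverse_cons, List.map_append, List.map_map, List.map_reverse]
  congr 1
  · congr 1
    apply List.map_congr_left
    intro p _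
    simp only [Function.comp]
    rw [pvDigit_succ m p]
  · simp only [List.map]
    congr 2
    rw [pow_zero, PySem.Int.floordiv_eq_ediv_of_pos (by norm_num : (0:Int) < 1)]
    simp

-- rank-based front-to-back digits coincide with the canonical bijective digits
theorem pvColName_eq_mapDesc (L : Nat) (hL : 1 ≤ L) :
    ∀ m : Int, 0 ≤ m → m < 26 ^ L → pvColName (pvC (L - 1) + 1 + m) = pvMapDesc L m := by
  induction L with
  | zero => omega
  | succ K ih =>
      intro m hm0 hmU
      by_cases hK : K = 0
      · subst hK
        rw [pvColName, dif_neg (by simp [pvC]; omega)]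
        have e1 : pvC (0 + 1 - 1) + 1 + m - 1 = m := by simp [pvC]
        rw [e1]
        rw [PySem.Int.floordiv_eq_ediv_of_pos (by norm_num)]
        have e2 : m / 26 = 0 := Int.ediv_eq_zero_of_lt hm0 (by simpa using hmU)
        rw [e2, pvColName, dif_pos (by norm_num)]
        unfold pvMapDesc
        simp only [show (0 + 1) = 1 from rfl, List.range_one, List.reverse_cons,
          List.reverse_nil, List.nil_append, List.map, pow_zero]
        rw [PySem.Int.floordiv_eq_ediv_of_pos (by norm_num : (0:Int) < 1), Int.ediv_one]
      · have hK1 : 1 ≤ K := by omega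
        have hC : pvC (K + 1 - 1) = pvC K := by simp
        rw [hC]
        have hn : ¬ (pvC K + 1 + m ≤ 0) := by have := pvC_nonneg K; omega
        rw [pvColName, dif_neg hn]
        have hKs : pvC K = 26 * pvC (K - 1) + 26 := by
          have : K = (K - 1) + 1 := by omega
          rw [this]; rfl
        have e1 : pvC K + 1 + m - 1 = 26 * (pvC (K - 1) + 1) + m := by rw [hKs]; ring
        rw [e1, PySem.Int.floordiv_eq_ediv_of_pos (by norm_num),
            PySem.Int.mod_eq_emod_of_pos (by norm_num)]
        have e2 : (26 * (pvC (K - 1) + 1) + m) / 26 = pvC (K - 1) + 1 + m / 26 := by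
          omega
        have e3 : (26 * (pvC (K - 1) + 1) + m) % 26 = m % 26 := by
          omega
        rw [e2, e3]
        have hq0 : 0 ≤ m / 26 := Int.ediv_nonneg hm0 (by norm_num)
        have hqU : m / 26 < 26 ^ K := by
          apply Int.ediv_lt_of_lt_mul (by norm_num)
          calc m < 26 ^ (K + 1) := hmU
            _ = 26 ^ K * 26 := by ring
        rw [ih hK1 (m / 26) hq0 hqU]
        rw [pvMapDesc_succ K m]
        congr 2
        rw [PySem.Int.mod_eq_emod_of_pos (by norm_num)]

-- appending folds are maps
theorem pvFoldl_append_map {α β : Type} (f : α → β) :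
    ∀ (l : List α) (a : List β),
      l.foldl (fun acc p => acc ++ [f p]) a = a ++ l.map f := by
  intro l
  induction l with
  | nil => intro a; simp
  | cons x xs ih => intro a; simp [List.foldl, ih]

-- B's digit fold over reversed(range(L)) is pvMapDesc L m
theorem pvFold_eq_mapDesc (L : Nat) (m : Int) :
    ((PySem.List.pyRange 0 (L : Int) 1).reverse).foldl
        (fun acc p =>
          acc ++ [PySem.List.pyGetD pvAlphabet
                    (PySem.Int.mod (PySem.Int.floordiv m (26 ^ p.toNat)) 26) ' ']) []
      = pvMapDesc L m := by
  rw [pvFoldl_append_map]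
  rw [PySem.List.pyRange_one]
  simp only [List.nil_append]
  rw [← List.map_reverse, List.map_map]
  unfold pvMapDesc
  have hL : ((L : Int) - 0).toNat = L := by omega
  rw [hL]
  congr 1
  funext p
  simp only [Function.comp]
  norm_num

-- ===== VERDICT (by name: the statement is the Claim_ definition above) =====
theorem xy_to_cell_spec : Claim_equal_xy_to_cell := by
  intro row_index col_index _
  unfold Spec_xy_to_cell xy_to_cell xy_to_cell_alt
  rw [pvLoopA_eq]
  simp only [List.nil_append, List.reverse_reverse]
  set n := col_index + 1 with hn
  by_cases hpos : n > 0
  · rw [if_pos hpos]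
    have hstart : (1 : Int) = ((1:Nat) : Int) ∧ (26 : Int) = pvC 1 ∧ pvC (1 - 1) < n := by
      refine ⟨by norm_num, by simp [pvC], by simpa [pvC] using hpos⟩
    obtain ⟨L', hL1, hloop, hlo, hhi⟩ :=
      pvLenLoop_spec n 1 26 ⟨1, le_refl 1, hstart.1, hstart.2.1, hstart.2.2⟩
    rw [hloop]
    have htn : ((L' : Int)).toNat = L' := by omega
    simp only [htn]
    have hCm : pvC L' - 26 ^ L' = pvC (L' - 1) := by
      have : L' = (L' - 1) + 1 := by omega
      rw [this, pvC_succ]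
      simp
    rw [hCm]
    set m := n - pvC (L' - 1) - 1 with hm
    have hm0 : 0 ≤ m := by omega
    have hmU : m < 26 ^ L' := by
      have : pvC L' = pvC (L' - 1) + 26 ^ L' := by omega
      omega
    rw [pvFold_eq_mapDesc L' m]
    rw [← pvColName_eq_mapDesc L' hL1 m hm0 hmU]
    have hgoal : n = pvC (L' - 1) + 1 + m := by omega
    rw [← hgoal]
  · rw [if_neg hpos]
    rw [pvColName, dif_pos (by omega : n ≤ 0)]
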